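-- pv_equiv track=rewrite | github.com/flyshadow-a/shiyou | pages/sacs_import_service.py | detect_levels
-- ===== SOURCE A (Python) =====
-- from collections import Counter, defaultdict
-- from typing import Any, Dict, List, Optional, Tuple
--
-- def detect_levels(joints: List[Dict[str, Any]], threshold: int) -> List[Dict[str, Any]]:
--     counter = Counter()
--
--     for j in joints:
--         z = j["z"]
--         if z is not None:
--             counter[z] += 1
--
--     selected_levels = [(z, occ) for z, occ in counter.items() if occ > threshold]
--     selected_levels.sort(key=lambda x: x[0], reverse=True)
--
--     rows = []
--     for idx, (z, occ) in enumerate(selected_levels, start=1):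
--         rows.append(
--             {
--                 "level_no": idx,
--                 "z": z,
--                 "occurrence": occ,
--                 "selected": 1,
--             }
--         )
--     return rows
-- ===== SOURCE B (Python) =====
-- def _runs(zs):
--     # runs of equal values in an already-sorted list: [(value, run length), ...]
--     if not zs:
--         return []
--     z = zs[0]
--     run = 1
--     while run < len(zs) and zs[run] == z:
--         run += 1
--     return [(z, run)] + _runs(zs[run:])
--
--
-- def detect_levels(joints, threshold):
--     zs = sorted((j["z"] for j in joints if j["z"] is not None), reverse=True)
--     rows = []
--     for z, occ in _runs(zs):
--         if occ > threshold:
--             rows.append({"level_no": len(rows) + 1, "z": z, "occurrence": occ, "selected": 1})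
--     return rows
-- ===== Notes on version B (the rewrite author's own statement) =====
-- stated objective: alternative
-- what changed: B replaces the Counter hash-count-then-sort pipeline by sort-first-then-scan: it sorts the z values descending, groups equal runs in one pass, and numbers the kept rows as it filters.
import Mathlib
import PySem

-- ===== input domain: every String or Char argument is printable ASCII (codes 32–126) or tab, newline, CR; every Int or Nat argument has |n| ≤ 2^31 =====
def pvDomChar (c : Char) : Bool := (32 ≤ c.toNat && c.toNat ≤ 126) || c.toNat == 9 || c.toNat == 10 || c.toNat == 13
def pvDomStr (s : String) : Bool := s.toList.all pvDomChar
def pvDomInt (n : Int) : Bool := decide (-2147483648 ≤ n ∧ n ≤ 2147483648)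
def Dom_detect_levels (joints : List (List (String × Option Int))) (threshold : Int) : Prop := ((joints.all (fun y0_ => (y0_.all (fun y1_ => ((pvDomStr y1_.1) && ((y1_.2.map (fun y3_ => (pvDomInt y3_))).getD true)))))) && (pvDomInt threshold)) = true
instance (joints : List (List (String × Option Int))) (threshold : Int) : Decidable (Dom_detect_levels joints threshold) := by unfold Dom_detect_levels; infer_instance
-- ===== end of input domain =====

-- B replaces Counter-then-sort by sort-then-run-scan; equivalence of the two pipelines proved below.

-- ===== PORT A =====
-- counter[z] += 1 over the joints; j["z"] is a dict lookup (KeyError excluded by Pre_)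
def pvCountStep (d : PySem.Dict Int Int) (j : List (String × Option Int)) : PySem.Dict Int Int :=
  match (PySem.Dict.mk j).get? "z" with
  | some (some z) => d.modify z 0 (· + 1)
  | _ => d

def pvRowA (p : Int × (Int × Int)) : List (String × Int) :=
  [("level_no", p.1), ("z", p.2.1), ("occurrence", p.2.2), ("selected", 1)]

def detect_levels (joints : List (List (String × Option Int))) (threshold : Int) : List (List (String × Int)) :=
  let counter := joints.foldl pvCountStep PySem.Dict.empty
  let selected := counter.items.filter (fun p => decide (threshold < p.2))
  let selected := PySem.List.sorted selected (fun p => p.1) true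
  (PySem.List.enumerate selected 1).map pvRowA

-- ===== PORT B =====
-- _runs: runs of equal values of an already-sorted list
def pvRuns : List Int → List (Int × Int)
  | [] => []
  | z :: rest =>
    (z, 1 + ((rest.takeWhile (fun y => y == z)).length : Int)) :: pvRuns (rest.dropWhile (fun y => y == z))
termination_by l => l.length
decreasing_by
  simpa using Nat.lt_succ_of_le (List.length_dropWhile_le _ _)

def detect_levels_alt (joints : List (List (String × Option Int))) (threshold : Int) : List (List (String × Int)) :=
  let zs := PySem.List.sorted (joints.filterMap (fun j => ((PySem.Dict.mk j).get? "z").join)) (fun z => z) true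
  (pvRuns zs).foldl
    (fun rows p =>
      if threshold < p.2 then
        rows ++ [[("level_no", (rows.length : Int) + 1), ("z", p.1), ("occurrence", p.2), ("selected", 1)]]
      else rows) []

-- ===== PRECONDITION & SPEC =====
-- Pre_ excludes exactly the joints lacking a "z" key, on which Python A raises KeyError.
def Pre_detect_levels (joints : List (List (String × Option Int))) (threshold : Int) : Prop :=
  ∀ j ∈ joints, (j.any (fun p => p.1 == "z")) = true
instance (joints : List (List (String × Option Int))) (threshold : Int) : Decidable (Pre_detect_levels joints threshold) := by unfold Pre_detect_levels; infer_instance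

def pvWitness_detect_levels : (List (List (String × Option Int))) × Int :=
  ([[("z", some 3)], [("z", some 3)], [("z", some 1)], [("z", none)]], 1)

def Spec_detect_levels (joints : List (List (String × Option Int))) (threshold : Int) (out : List (List (String × Int))) : Prop := out = detect_levels_alt joints threshold
instance (joints : List (List (String × Option Int))) (threshold : Int) (out : List (List (String × Int))) : Decidable (Spec_detect_levels joints threshold out) := by unfold Spec_detect_levels; infer_instance

-- ===== CLAIM (what is proved, stated in full; the proofs are below) =====
def Claim_equal_detect_levels : Prop := ∀ (joints : List (List (String × Option Int))) (threshold : Int), Dom_detect_levels joints threshold → Pre_detect_levels joints threshold → Spec_detect_levels joints threshold (detect_levels joints threshold)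

-- ===== LEMMAS AND PROOFS =====

-- 1. the counting fold over joints is Counter of the extracted z list
theorem foldl_countStep (joints : List (List (String × Option Int))) (d : PySem.Dict Int Int) :
    joints.foldl pvCountStep d =
      (joints.filterMap (fun j => ((PySem.Dict.mk j).get? "z").join)).foldl
        (fun d z => d.modify z 0 (· + 1)) d := by
  induction joints generalizing d with
  | nil => rfl
  | cons j js ih =>
    simp only [List.foldl_cons, List.filterMap_cons]
    cases h : ((PySem.Dict.mk j).get? "z").join with
    | none =>
      have : pvCountStep d j = d := by
        unfold pvCountStep
        cases h' : (PySem.Dict.mk j).get? "z" with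
        | none => rfl
        | some o => cases o with
          | none => rfl
          | some z => simp [h'] at h
      rw [this, ih]
    | some z =>
      have : pvCountStep d j = d.modify z 0 (· + 1) := by
        unfold pvCountStep
        cases h' : (PySem.Dict.mk j).get? "z" with
        | none => simp [h'] at h
        | some o => cases o with
          | none => simp [h'] at h
          | some z' => simp [h'] at h; subst h; rfl
      rw [this, List.foldl_cons, ih]

-- 2. helper: after dropping the leading run of z, everything is strictly below z
theorem dropWhile_lt (z : Int) (rest : List Int) (hp : rest.Pairwise (fun a b => b ≤ a))
    (hle : ∀ y ∈ rest, y ≤ z) : ∀ y ∈ rest.dropWhile (fun y => y == z), y < z := by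
  induction rest with
  | nil => simp
  | cons a rest' ih =>
    rw [List.dropWhile_cons]
    by_cases ha : a = z
    · simp only [ha, beq_self_eq_true, if_pos]
      exact ih hp.tail (fun y hy => hle y (List.mem_cons_of_mem _ hy))
    · have haz : (a == z) = false := by simp [ha]
      simp only [haz, Bool.false_eq_true, if_neg, not_false_iff]
      intro y hy
      rcases List.mem_cons.mp hy with rfl | hy'
      · exact lt_of_le_of_ne (hle _ (List.mem_cons_self)) ha
      · exact lt_of_le_of_lt (List.rel_of_pairwise_cons hp hy')
          (lt_of_le_of_ne (hle _ (List.mem_cons_self)) ha)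

-- counts of the leading run / the remainder
theorem count_decomp (z : Int) (rest : List Int) (hp : rest.Pairwise (fun a b => b ≤ a))
    (hle : ∀ y ∈ rest, y ≤ z) :
    rest.count z = (rest.takeWhile (fun y => y == z)).length ∧
    (∀ x : Int, x ≠ z → rest.count x = (rest.dropWhile (fun y => y == z)).count x) := by
  have hsplit := List.takeWhile_append_dropWhile (p := fun y => y == z) (l := rest)
  have htw : ∀ y ∈ rest.takeWhile (fun y => y == z), y = z := by
    intro y hy; simpa using List.mem_takeWhile_imp hy
  have hdw := dropWhile_lt z rest hp hle
  constructor
  · conv_lhs => rw [← hsplit]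
    rw [List.count_append]
    have h1 : List.count z (rest.takeWhile (fun y => y == z)) = (rest.takeWhile (fun y => y == z)).length :=
      List.count_eq_length.mpr (fun b hb => (htw b hb).symm)
    have h2 : List.count z (rest.dropWhile (fun y => y == z)) = 0 :=
      List.count_eq_zero.mpr (fun hz => lt_irrefl z (hdw z hz))
    omega
  · intro x hx
    conv_lhs => rw [← hsplit]
    rw [List.count_append]
    have h1 : List.count x (rest.takeWhile (fun y => y == z)) = 0 :=
      List.count_eq_zero.mpr (fun hxm => hx (htw x hxm))
    omega

-- pvRuns of a descending-sorted list: membership and key order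
theorem pvRuns_mem (ds : List Int) (hs : ds.Pairwise (fun a b => b ≤ a)) (p : Int × Int) :
    p ∈ pvRuns ds ↔ p.1 ∈ ds ∧ p.2 = (ds.count p.1 : Int) := by
  induction ds using pvRuns.induct with
  | case1 => simp [pvRuns]
  | case2 z rest ih =>
    have hle : ∀ y ∈ rest, y ≤ z := fun y hy => List.rel_of_pairwise_cons hs hy
    have hcd := count_decomp z rest hs.tail hle
    have hdw_pw : (rest.dropWhile (fun y => y == z)).Pairwise (fun a b => b ≤ a) :=
      List.Pairwise.sublist (List.dropWhile_sublist _) hs.tail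
    have hdw_lt := dropWhile_lt z rest hs.tail hle
    rw [pvRuns]
    constructor
    · intro hp
      rcases List.mem_cons.mp hp with rfl | hp'
      · refine ⟨List.mem_cons_self, ?_⟩
        simp only [List.count_cons_self]
        rw [hcd.1]; push_cast; ring
      · obtain ⟨hm, hc⟩ := (ih hdw_pw).mp hp'
        have hlt := hdw_lt _ hm
        have hne : p.1 ≠ z := ne_of_lt hlt
        refine ⟨List.mem_cons_of_mem _ ((List.dropWhile_sublist _).subset hm), ?_⟩
        rw [List.count_cons_of_ne (Ne.symm hne), hcd.2 _ hne]; exact hc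
    · rintro ⟨hm, hc⟩
      by_cases hz : p.1 = z
      · have h2 : p.2 = 1 + ((rest.takeWhile (fun y => y == z)).length : Int) := by
          rw [hc, hz, List.count_cons_self, hcd.1]; push_cast; ring
        exact List.mem_cons.mpr (Or.inl (Prod.ext hz h2))
      · apply List.mem_cons.mpr; right
        apply (ih hdw_pw).mpr
        have hm' : p.1 ∈ rest := (List.mem_cons.mp hm).resolve_left hz
        have hmdw : p.1 ∈ rest.dropWhile (fun y => y == z) := by
          have := List.takeWhile_append_dropWhile (p := fun y => y == z) (l := rest)
          rcases List.mem_append.mp (this ▸ hm') with h | h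
          · exact absurd (by simpa using List.mem_takeWhile_imp h) hz
          · exact h
        refine ⟨hmdw, ?_⟩
        rw [hc, List.count_cons_of_ne (Ne.symm hz), hcd.2 _ hz]

theorem pvRuns_pairwise (ds : List Int) (hs : ds.Pairwise (fun a b => b ≤ a)) :
    (pvRuns ds).Pairwise (fun p q => q.1 < p.1) := by
  induction ds using pvRuns.induct with
  | case1 => simp [pvRuns]
  | case2 z rest ih =>
    have hle : ∀ y ∈ rest, y ≤ z := fun y hy => List.rel_of_pairwise_cons hs hy
    have hdw_pw : (rest.dropWhile (fun y => y == z)).Pairwise (fun a b => b ≤ a) :=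
      List.Pairwise.sublist (List.dropWhile_sublist _) hs.tail
    rw [pvRuns]
    refine List.pairwise_cons.mpr ⟨?_, ih hdw_pw⟩
    intro q hq
    have := ((pvRuns_mem _ hdw_pw q).mp hq).1
    exact dropWhile_lt z rest hs.tail hle _ this

-- 3. B's fold interleaving filter and numbering = enumerate of the filtered list
theorem foldl_rows (threshold : Int) (L : List (Int × Int)) (rows : List (List (String × Int))) :
    L.foldl (fun rows p =>
        if threshold < p.2 then
          rows ++ [[("level_no", (rows.length : Int) + 1), ("z", p.1), ("occurrence", p.2), ("selected", 1)]]
        else rows) rows =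
      rows ++ (PySem.List.enumerate (L.filter (fun p => decide (threshold < p.2))) (rows.length + 1)).map pvRowA := by
  induction L generalizing rows with
  | nil => simp
  | cons p L ih =>
    rw [List.foldl_cons, List.filter_cons]
    by_cases h : threshold < p.2
    · simp only [h, decide_true, if_pos]
      rw [ih, PySem.List.enumerate_cons, List.map_cons]
      simp only [List.append_assoc, List.length_append, List.length_cons, List.length_nil, pvRowA]
      push_cast
      ring_nf
      simp
    · simp only [h, decide_false, Bool.false_eq_true, if_neg, not_false_iff]
      rw [ih]

-- main
theorem main_eq (joints : List (List (String × Option Int))) (threshold : Int) :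
    detect_levels joints threshold = detect_levels_alt joints threshold := by
  simp only [detect_levels, detect_levels_alt]
  set zs := joints.filterMap (fun j => ((PySem.Dict.mk j).get? "z").join) with hzsdef
  set ds := PySem.List.sorted zs (fun z => z) true with hdsdef
  have hdsp : ds.Pairwise (fun a b => b ≤ a) := PySem.List.sorted_pairwise_rev zs (fun z => z)
  have hperm : ds.Perm zs := PySem.List.sorted_perm zs (fun z => z) true
  have hcounter : joints.foldl pvCountStep PySem.Dict.empty = PySem.Dict.counter zs := by
    rw [foldl_countStep]; rfl
  have hnd1 : (pvRuns ds).Nodup :=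
    (pvRuns_pairwise ds hdsp).imp (fun {a b} h => by rintro rfl; exact lt_irrefl _ h)
  have hnd2 : ((PySem.Set.ofList zs).map (fun k => (k, (List.count k zs : Int)))).Nodup :=
    List.Nodup.map (fun a b h => congrArg Prod.fst h) (PySem.Set.nodup_ofList zs)
  have hpermRuns : (pvRuns ds).Perm ((PySem.Dict.counter zs).items) := by
    rw [PySem.Dict.items_counter]
    apply (List.perm_ext_iff_of_nodup hnd1 hnd2).mpr
    intro p
    rw [pvRuns_mem ds hdsp p, List.mem_map]
    constructor
    · rintro ⟨hm, hc⟩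
      obtain ⟨p1, p2⟩ := p
      simp only at hm hc
      exact ⟨p1, (PySem.Set.mem_ofList zs p1).mpr (hperm.mem_iff.mp hm),
        by simp [hc, hperm.count_eq]⟩
    · rintro ⟨k, hk, hkp⟩
      subst hkp
      exact ⟨hperm.mem_iff.mpr ((PySem.Set.mem_ofList zs k).mp hk), by simp [hperm.count_eq]⟩
  have hsorted :
      PySem.List.sorted (((PySem.Dict.counter zs).items).filter (fun p => decide (threshold < p.2)))
        (fun p => p.1) true = (pvRuns ds).filter (fun p => decide (threshold < p.2)) :=
    PySem.List.sorted_rev_eq_of_perm_of_pairwise_gt _ _ _ (hpermRuns.filter _)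
      (List.Pairwise.filter _ (pvRuns_pairwise ds hdsp))
  rw [hcounter, hsorted, foldl_rows]
  simp

-- ===== VERDICT (by name: the statement is the Claim_ definition above) =====
theorem detect_levels_spec : Claim_equal_detect_levels := by
  intro joints threshold _ _
  exact main_eq joints threshold
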